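-- pv_equiv track=rewrite | github.com/abhinavanand500/Competitive | codeforces/shell.py | maxmarks
-- ===== SOURCE A (Python) =====
-- def maxmarks(input1, input2):
--     d = {}
--     for i in input2:
--         if i in d:
--             d[i] = d[i]+1
--         else:
--             d[i] = 1
--     arr1 = []
--     arr2 = []
--     for i in d:
--         arr1.append(i)
--         if(d[i] > 1):
--             ans = d[i]
--             while(ans > 1):
--                 ans -= 1
--                 arr2.append(i)
--     for i in range(len(arr2)):
--         count = 0
--         while(count != 1):
--             if arr2[i] in arr1:
--                 arr2[i] += 1
--             if arr2[i] not in arr1: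
--                 arr1.append(arr2[i])
--                 count = 1
--     sum1 = 0
--     for i in arr1:
--         sum1 += i
--     return sum1
-- ===== SOURCE B (Python) =====
-- def maxmarks(input1, input2):
--     total = 0
--     prev = None
--     for x in sorted(input2):
--         y = x if prev is None or x > prev else prev + 1
--         total += y
--         prev = y
--     return total
-- ===== Notes on version B (the rewrite author's own statement) =====
-- stated objective: faster
-- what changed: Replaced the dict-count + repeated linear 'bump until value unused in list' scans by a single sort-then-sweep (y = max(x, prev+1)) that sums the unique slots directly; correctness rests on order-independence of the parking/next-free-slot process.
import Mathlib
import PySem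

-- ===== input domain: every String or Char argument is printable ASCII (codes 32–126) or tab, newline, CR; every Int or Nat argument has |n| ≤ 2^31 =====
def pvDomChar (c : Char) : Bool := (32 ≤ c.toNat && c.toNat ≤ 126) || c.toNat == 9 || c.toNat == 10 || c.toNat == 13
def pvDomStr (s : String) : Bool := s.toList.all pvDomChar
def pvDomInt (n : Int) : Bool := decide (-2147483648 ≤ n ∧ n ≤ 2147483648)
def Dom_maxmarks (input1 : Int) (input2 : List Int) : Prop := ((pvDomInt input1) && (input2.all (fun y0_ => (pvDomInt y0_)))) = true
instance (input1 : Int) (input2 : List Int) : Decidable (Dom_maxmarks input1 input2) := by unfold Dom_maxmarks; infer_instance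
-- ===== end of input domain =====

-- B replaces A's dict-count plus per-duplicate linear bump-until-free scans by one
-- sort-then-sweep pass; objective: faster (asymptotically, O(n log n) vs quadratic).

-- ===== PORT A =====

-- A's inner `while count != 1` loop: bump arr2[i] until it is not in arr1
-- (structural recursion on fuel; fuel (max arr1 + 1 - v) is enough, since bumping stops past the maximum)
def pvSettleN : Nat → List Int → Int → Int
  | 0, _, v => v
  | n + 1, S, v => if v ∈ S then pvSettleN n S (v + 1) else v

def pvSettle (arr1 : List Int) (v : Int) : Int :=
  pvSettleN (arr1.foldr max 0 + 1 - v).toNat arr1 v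

-- the `while ans > 1: ans -= 1; arr2.append(i)` loop: one append per decrement, ans - 1 of them
def pvRepN : Nat → Int → List Int → List Int
  | 0, _, acc => acc
  | n + 1, k, acc => pvRepN n k (acc ++ [k])

def pvRep (ans k : Int) (acc : List Int) : List Int := pvRepN (ans - 1).toNat k acc

def maxmarks (input1 : Int) (input2 : List Int) : Int :=
  let d := input2.foldl
    (fun d i => if d.contains i then d.insert i (d.getD i 0 + 1) else d.insert i 1)
    (PySem.Dict.empty : PySem.Dict Int Int)
  let p := d.items.foldl
    (fun (p : List Int × List Int) kv =>
      (p.1 ++ [kv.1], if kv.2 > 1 then pvRep kv.2 kv.1 p.2 else p.2))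
    ([], [])
  let arr1 := p.2.foldl (fun arr1 v => arr1 ++ [pvSettle arr1 v]) p.1
  arr1.foldl (fun s i => s + i) 0

-- ===== PORT B =====
def maxmarks_alt (input1 : Int) (input2 : List Int) : Int :=
  ((PySem.List.sorted input2 (fun x => x) false).foldl
    (fun (st : Int × Option Int) x =>
      let y := match st.2 with
        | none => x
        | some p => if x > p then x else p + 1
      (st.1 + y, some y)) ((0 : Int), (none : Option Int))).1

-- ===== PRECONDITION & SPEC =====
def Spec_maxmarks (input1 : Int) (input2 : List Int) (out : Int) : Prop := out = maxmarks_alt input1 input2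
instance (input1 : Int) (input2 : List Int) (out : Int) : Decidable (Spec_maxmarks input1 input2 out) := by unfold Spec_maxmarks; infer_instance

-- ===== CLAIM (what is proved, stated in full; the proofs are below) =====
def Claim_equal_maxmarks : Prop := ∀ (input1 : Int) (input2 : List Int), Dom_maxmarks input1 input2 → Spec_maxmarks input1 input2 (maxmarks input1 input2)

-- ===== LEMMAS AND PROOFS =====

-- ---------- proof-side machinery ----------

-- bound used as loop fuel: a member is at most the running foldr-max
theorem pv_mem_le_foldr_max (v : Int) (S : List Int) (h : v ∈ S) : v ≤ S.foldr max 0 := by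
  induction S with
  | nil => cases h
  | cons a t ih =>
    rcases List.mem_cons.mp h with h | h
    · subst h; exact le_max_left _ _
    · exact le_trans (ih h) (le_max_right _ _)


-- the parking fold: insert each value at its next free slot
def pvPark (S : List Int) (l : List Int) : List Int :=
  l.foldl (fun S v => S ++ [pvSettle S v]) S

-- membership equivalence of slot lists
def pvE (S T : List Int) : Prop := ∀ z : Int, z ∈ S ↔ z ∈ T

theorem pvSettleN_spec : ∀ (n : Nat) (S : List Int) (v : Int), (∀ u ∈ S, u < v + n) →
    v ≤ pvSettleN n S v ∧ pvSettleN n S v ∉ S ∧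
      (∀ u, v ≤ u → u < pvSettleN n S v → u ∈ S) := by
  intro n
  induction n with
  | zero =>
    intro S v h
    simp only [pvSettleN]
    exact ⟨le_rfl, fun hm => by have := h v hm; omega, fun u h1 h2 => by omega⟩
  | succ n ih =>
    intro S v h
    simp only [pvSettleN]
    by_cases hv : v ∈ S
    · rw [if_pos hv]
      obtain ⟨g1, g2, g3⟩ := ih S (v + 1) (fun u hu => by have := h u hu; omega)
      refine ⟨by omega, g2, ?_⟩
      intro u h1 h2
      rcases eq_or_lt_of_le h1 with rfl | h1'
      · exact hv
      · exact g3 u (by omega) h2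
    · rw [if_neg hv]
      exact ⟨le_rfl, hv, fun u h1 h2 => by omega⟩

theorem pvSettle_spec (S : List Int) (v : Int) :
    v ≤ pvSettle S v ∧ pvSettle S v ∉ S ∧
      (∀ u, v ≤ u → u < pvSettle S v → u ∈ S) := by
  apply pvSettleN_spec
  intro u hu
  have := pv_mem_le_foldr_max u S hu
  omega

theorem pvSettle_ge (S : List Int) (v : Int) : v ≤ pvSettle S v := (pvSettle_spec S v).1

theorem pvSettle_not_mem (S : List Int) (v : Int) : pvSettle S v ∉ S := (pvSettle_spec S v).2.1

theorem pvSettle_between (S : List Int) (v : Int) :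
    ∀ u, v ≤ u → u < pvSettle S v → u ∈ S := (pvSettle_spec S v).2.2

theorem pvSettle_intro (S : List Int) (v w : Int) (h1 : v ≤ w) (h2 : w ∉ S)
    (h3 : ∀ u, v ≤ u → u < w → u ∈ S) : pvSettle S v = w := by
  rcases lt_trichotomy (pvSettle S v) w with h | h | h
  · exact absurd (h3 _ (pvSettle_ge S v) h) (pvSettle_not_mem S v)
  · exact h
  · exact absurd (pvSettle_between S v w h1 h) h2

theorem pvSettle_of_not_mem (S : List Int) (v : Int) (h : v ∉ S) : pvSettle S v = v :=
  pvSettle_intro S v v le_rfl h (fun u h1 h2 => by omega)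

theorem pvSettle_congr (S T : List Int) (v : Int) (h : pvE S T) :
    pvSettle S v = pvSettle T v := by
  refine (pvSettle_intro T v (pvSettle S v) (pvSettle_ge S v)
    (fun hm => pvSettle_not_mem S v ((h _).mpr hm)) ?_).symm
  intro u h1 h2
  exact (h u).mp (pvSettle_between S v u h1 h2)

theorem pvE_refl (S : List Int) : pvE S S := fun _ => Iff.rfl

theorem pvE_trans {S T U : List Int} (h1 : pvE S T) (h2 : pvE T U) : pvE S U :=
  fun z => (h1 z).trans (h2 z)

theorem pvE_step {S T : List Int} (v : Int) (h : pvE S T) :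
    pvE (S ++ [pvSettle S v]) (T ++ [pvSettle T v]) := by
  intro z
  simp only [List.mem_append, List.mem_singleton, pvSettle_congr S T v h, h z]

theorem pvPark_nil (S : List Int) : pvPark S [] = S := rfl

theorem pvPark_cons (S : List Int) (v : Int) (l : List Int) :
    pvPark S (v :: l) = pvPark (S ++ [pvSettle S v]) l := rfl

theorem pvPark_append (S : List Int) (l1 l2 : List Int) :
    pvPark S (l1 ++ l2) = pvPark (pvPark S l1) l2 := by
  simp [pvPark, List.foldl_append]

theorem pvPark_congr (l : List Int) : ∀ S T, pvE S T → pvE (pvPark S l) (pvPark T l) := by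
  induction l with
  | nil => intro S T h; exact h
  | cons v l ih =>
    intro S T h
    rw [pvPark_cons, pvPark_cons]
    exact ih _ _ (pvE_step v h)

-- the commutation (parking-lemma) step: parking x then y occupies the same slots as y then x
theorem pvPark_swap (S : List Int) (x y : Int) :
    pvE (pvPark S [x, y]) (pvPark S [y, x]) := by
  obtain ⟨hax, haS, haI⟩ : x ≤ pvSettle S x ∧ pvSettle S x ∉ S ∧
      (∀ u, x ≤ u → u < pvSettle S x → u ∈ S) :=
    ⟨pvSettle_ge S x, pvSettle_not_mem S x, pvSettle_between S x⟩
  obtain ⟨hby, hbS, hbI⟩ : y ≤ pvSettle S y ∧ pvSettle S y ∉ S ∧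
      (∀ u, y ≤ u → u < pvSettle S y → u ∈ S) :=
    ⟨pvSettle_ge S y, pvSettle_not_mem S y, pvSettle_between S y⟩
  by_cases hab : pvSettle S x = pvSettle S y
  · -- both want the same slot c = pvSettle S x; the loser lands at the next free slot after c
    obtain ⟨hdc, hdS, hdI⟩ : pvSettle S x + 1 ≤ pvSettle (S ++ [pvSettle S x]) (pvSettle S x + 1) ∧
        pvSettle (S ++ [pvSettle S x]) (pvSettle S x + 1) ∉ S ++ [pvSettle S x] ∧
        (∀ u, pvSettle S x + 1 ≤ u → u < pvSettle (S ++ [pvSettle S x]) (pvSettle S x + 1) →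
          u ∈ S ++ [pvSettle S x]) :=
      ⟨pvSettle_ge _ _, pvSettle_not_mem _ _, pvSettle_between _ _⟩
    have h1 : pvSettle (S ++ [pvSettle S x]) y = pvSettle (S ++ [pvSettle S x]) (pvSettle S x + 1) := by
      apply pvSettle_intro
      · omega
      · exact hdS
      · intro u h1 h2
        by_cases huc : u ≤ pvSettle S x
        · rcases eq_or_lt_of_le huc with rfl | h
          · simp
          · exact List.mem_append.mpr (Or.inl (hbI u h1 (by omega)))
        · exact hdI u (by omega) h2
    have h2 : pvSettle (S ++ [pvSettle S y]) x = pvSettle (S ++ [pvSettle S x]) (pvSettle S x + 1) := by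
      rw [← hab]
      apply pvSettle_intro
      · omega
      · exact hdS
      · intro u h1 h2
        by_cases huc : u ≤ pvSettle S x
        · rcases eq_or_lt_of_le huc with rfl | h
          · simp
          · exact List.mem_append.mpr (Or.inl (haI u h1 (by omega)))
        · exact hdI u (by omega) h2
    intro z
    simp only [pvPark_cons, pvPark_nil, h1, h2, List.mem_append, List.mem_singleton]
    simp only [hab]
  · -- different target slots: each still gets its slot in either order
    have h1 : pvSettle (S ++ [pvSettle S x]) y = pvSettle S y := by
      apply pvSettle_intro
      · exact hby
      · simp only [List.mem_append, List.mem_singleton]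
        push Not
        exact ⟨hbS, fun e => hab e.symm⟩
      · intro u h1 h2; exact List.mem_append.mpr (Or.inl (hbI u h1 h2))
    have h2 : pvSettle (S ++ [pvSettle S y]) x = pvSettle S x := by
      apply pvSettle_intro
      · exact hax
      · simp only [List.mem_append, List.mem_singleton]
        push Not
        exact ⟨haS, hab⟩
      · intro u h1 h2; exact List.mem_append.mpr (Or.inl (haI u h1 h2))
    intro z
    simp only [pvPark_cons, pvPark_nil, h1, h2]
    simp
    tauto

theorem pvPark_perm {l1 l2 : List Int} (h : l1.Perm l2) :
    ∀ S, pvE (pvPark S l1) (pvPark S l2) := by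
  induction h with
  | nil => intro S; exact pvE_refl _
  | cons x _ ih =>
    intro S
    rw [pvPark_cons, pvPark_cons]
    exact ih _
  | swap x y l =>
    intro S
    have h1 : pvE (pvPark S [y, x]) (pvPark S [x, y]) := pvPark_swap S y x
    have : pvE (pvPark (pvPark S [y, x]) l) (pvPark (pvPark S [x, y]) l) :=
      pvPark_congr l _ _ h1
    simpa [pvPark_append] using this
  | trans _ _ ih1 ih2 =>
    intro S
    exact pvE_trans (ih1 S) (ih2 S)

theorem pvPark_nodup (l : List Int) : ∀ S, S.Nodup → (pvPark S l).Nodup := by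
  induction l with
  | nil => intro S h; exact h
  | cons v l ih =>
    intro S h
    rw [pvPark_cons]
    refine ih _ ?_
    rw [List.nodup_append]
    refine ⟨h, List.nodup_singleton _, ?_⟩
    intro a ha b hb e
    have hb' : b = pvSettle S v := by simpa using hb
    exact pvSettle_not_mem S v ((e.trans hb') ▸ ha)

theorem pvPark_fresh (l : List Int) : ∀ S, (∀ x ∈ l, x ∉ S) → l.Nodup →
    pvPark S l = S ++ l := by
  induction l with
  | nil => intro S _ _; simp [pvPark_nil]
  | cons v l ih =>
    intro S hfresh hnd
    rw [pvPark_cons]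
    have hv : v ∉ S := hfresh v (by simp)
    have hs : pvSettle S v = v := pvSettle_of_not_mem S v hv
    rw [hs, ih (S ++ [v])]
    · simp
    · intro x hx
      simp only [List.mem_append, List.mem_singleton]
      push Not
      exact ⟨hfresh x (by simp [hx]), fun e => (List.nodup_cons.mp hnd).1 (e ▸ hx)⟩
    · exact (List.nodup_cons.mp hnd).2

-- sums agree for nodup membership-equivalent lists
theorem pvE_sum {S T : List Int} (h : pvE S T) (h1 : S.Nodup) (h2 : T.Nodup) :
    S.sum = T.sum := by
  have : S.Perm T := (List.perm_ext_iff_of_nodup h1 h2).mpr h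
  exact this.sum_eq

theorem pv_foldl_add (l : List Int) : ∀ a : Int, l.foldl (fun s i => s + i) a = a + l.sum := by
  induction l with
  | nil => intro a; simp
  | cons x l ih => intro a; simp [ih, add_assoc]

-- ---------- characterisation of A ----------

theorem pvRepN_eq : ∀ (n : Nat) (k : Int) (acc : List Int),
    pvRepN n k acc = acc ++ List.replicate n k := by
  intro n
  induction n with
  | zero => intro k acc; simp [pvRepN]
  | succ m ih =>
    intro k acc
    simp only [pvRepN, ih, List.replicate_succ]
    simp [List.append_assoc]

theorem pvRep_eq (ans k : Int) (acc : List Int) :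
    pvRep ans k acc = acc ++ List.replicate (ans - 1).toNat k := pvRepN_eq _ k acc

theorem pv_dict_eq_counter (input2 : List Int) :
    input2.foldl
      (fun d i => if d.contains i then d.insert i (d.getD i 0 + 1) else d.insert i 1)
      (PySem.Dict.empty : PySem.Dict Int Int) = PySem.Dict.counter input2 := by
  rw [← PySem.Dict.foldl_insert_getD_add_one_eq_counter]
  apply PySem.List.foldl_congr_mem
  intro d i _
  by_cases h : d.contains i = true
  · simp [h]
  · have h0 : d.getD i 0 = 0 := PySem.Dict.getD_of_not_contains d 0 (by simpa using h)
    simp [h, h0]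

-- the second loop over d.items, unrolled
theorem pv_items_fold (L : List (Int × Int)) : ∀ (a1 a2 : List Int),
    L.foldl (fun (p : List Int × List Int) kv =>
      (p.1 ++ [kv.1], if kv.2 > 1 then pvRep kv.2 kv.1 p.2 else p.2)) (a1, a2) =
    (a1 ++ L.map (·.1),
     a2 ++ L.flatMap (fun kv => if kv.2 > 1 then List.replicate (kv.2 - 1).toNat kv.1 else [])) := by
  induction L with
  | nil => intro a1 a2; simp
  | cons kv L ih =>
    intro a1 a2
    simp only [List.foldl_cons, ih, List.map_cons, List.flatMap_cons]
    by_cases h : kv.2 > 1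
    · simp [h, pvRep_eq]
    · simp [h]

-- counting: the distinct keys followed by the duplicate copies are a permutation of the input
theorem pv_count_flatMap (xs : List Int) (z : Int) :
    ∀ K : List Int, K.Nodup → (∀ k ∈ K, k ∈ xs) →
    (K.flatMap (fun k => if (xs.count k : Int) > 1 then List.replicate ((xs.count k : Int) - 1).toNat k else [])).count z
      = if z ∈ K then xs.count z - 1 else 0 := by
  intro K
  induction K with
  | nil => simp
  | cons k K ih =>
    intro hnd hmem
    have hk : k ∈ xs := hmem k (by simp)
    have hc1 : 1 ≤ xs.count k := List.one_le_count_iff.mpr hk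
    have hkK : k ∉ K := (List.nodup_cons.mp hnd).1
    rw [List.flatMap_cons, List.count_append,
      ih (List.nodup_cons.mp hnd).2 (fun x hx => hmem x (by simp [hx]))]
    have hC : ((if (xs.count k : Int) > 1 then List.replicate ((xs.count k : Int) - 1).toNat k else []) : List Int).count z
        = if z = k then xs.count k - 1 else 0 := by
      by_cases hgt : (xs.count k : Int) > 1
      · rw [if_pos hgt, List.count_replicate]
        by_cases hzk : z = k
        · rw [if_pos (by simp [hzk]), if_pos hzk]
          omega
        · rw [if_neg (by simp [Ne.symm hzk]), if_neg hzk]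
      · rw [if_neg hgt]
        have h1 : xs.count k = 1 := by omega
        simp [h1]
    rw [hC]
    by_cases hzk : z = k
    · subst hzk
      rw [if_pos rfl, if_neg hkK, if_pos (by simp)]
      omega
    · rw [if_neg hzk]
      by_cases hzK : z ∈ K
      · rw [if_pos hzK, if_pos (by simp [hzK])]
        omega
      · rw [if_neg hzK, if_neg (by simp [hzk, hzK])]

theorem pv_keys_dups_perm (xs : List Int) :
    (PySem.Set.ofList xs ++ (PySem.Set.ofList xs).flatMap
      (fun k => if (xs.count k : Int) > 1 then List.replicate ((xs.count k : Int) - 1).toNat k else [])).Perm xs := by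
  apply List.perm_iff_count.mpr
  intro z
  rw [List.count_append,
    pv_count_flatMap xs z _ (PySem.Set.nodup_ofList xs) (fun k hk => (PySem.Set.mem_ofList _ _).mp hk)]
  by_cases hz : z ∈ xs
  · have h1 : 1 ≤ xs.count z := List.one_le_count_iff.mpr hz
    have hmem : z ∈ PySem.Set.ofList xs := (PySem.Set.mem_ofList _ _).mpr hz
    rw [List.count_eq_one_of_mem (PySem.Set.nodup_ofList xs) hmem, if_pos hmem]
    omega
  · have hmem : z ∉ PySem.Set.ofList xs := fun h => hz ((PySem.Set.mem_ofList _ _).mp h)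
    rw [List.count_eq_zero_of_not_mem hmem, List.count_eq_zero_of_not_mem hz, if_neg hmem]

-- A computes the sum of the parked slots of (keys ++ duplicates)
theorem pv_maxmarks_eq_park (input1 : Int) (input2 : List Int) :
    maxmarks input1 input2 =
      (pvPark [] (PySem.Set.ofList input2 ++ (PySem.Set.ofList input2).flatMap
        (fun k => if (input2.count k : Int) > 1 then List.replicate ((input2.count k : Int) - 1).toNat k else []))).sum := by
  simp only [maxmarks]
  rw [pv_dict_eq_counter, PySem.Dict.items_counter, pv_items_fold, List.map_map, List.flatMap_map]
  have hmapid : (PySem.Set.ofList input2).map ((fun x => x.1) ∘ fun k => (k, (input2.count k : Int)))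
      = PySem.Set.ofList input2 := by simp [Function.comp_def]
  rw [hmapid, pv_foldl_add, pvPark_append]
  have hfresh : pvPark [] (PySem.Set.ofList input2) = PySem.Set.ofList input2 := by
    rw [pvPark_fresh _ [] (by simp) (PySem.Set.nodup_ofList input2)]
    simp
  rw [hfresh]
  simp only [pvPark, zero_add, List.nil_append]

-- ---------- characterisation of B ----------

theorem pv_sweep (l : List Int) : ∀ (S : List Int) (p t m : Int),
    (∀ z ∈ S, z ≤ p) → (∀ u, m ≤ u → u ≤ p → u ∈ S) → (∀ x ∈ l, m ≤ x) →
    l.Pairwise (· ≤ ·) →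
    (l.foldl (fun (st : Int × Option Int) x =>
      let y := match st.2 with
        | none => x
        | some p => if x > p then x else p + 1
      (st.1 + y, some y)) (t, some p)).1 = t + ((pvPark S l).sum - S.sum) := by
  induction l with
  | nil => intro S p t m _ _ _ _; simp [pvPark_nil]
  | cons x l ih =>
    intro S p t m hub hfull hge hpw
    have hsettle : pvSettle S x = if x > p then x else p + 1 := by
      by_cases hxp : x > p
      · have hxS : x ∉ S := fun h => absurd (hub x h) (by omega)
        rw [if_pos hxp]
        exact pvSettle_of_not_mem S x hxS
      · rw [if_neg hxp]
        apply pvSettle_intro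
        · omega
        · intro h; exact absurd (hub _ h) (by omega)
        · intro u h1 h2
          exact hfull u (le_trans (hge x (by simp)) h1) (by omega)
    have hub' : ∀ z ∈ S ++ [if x > p then x else p + 1], z ≤ (if x > p then x else p + 1) := by
      intro z hz
      rcases List.mem_append.mp hz with h | h
      · have := hub z h; split <;> omega
      · simp at h; omega
    have hfull' : ∀ u, x ≤ u → u ≤ (if x > p then x else p + 1) →
        u ∈ S ++ [if x > p then x else p + 1] := by
      intro u h1 h2
      by_cases hxp : x > p
      · have : u = x := by rw [if_pos hxp] at h2; omega
        subst this
        simp [hxp]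
      · rw [if_neg hxp] at h2 ⊢
        by_cases hup : u ≤ p
        · exact List.mem_append.mpr (Or.inl (hfull u (le_trans (hge x (by simp)) h1) hup))
        · have : u = p + 1 := by omega
          subst this
          simp
    have step : (l.foldl (fun (st : Int × Option Int) x =>
        let y := match st.2 with
          | none => x
          | some p => if x > p then x else p + 1
        (st.1 + y, some y)) (t + (if x > p then x else p + 1), some (if x > p then x else p + 1))).1
        = (t + (if x > p then x else p + 1)) +
          ((pvPark (S ++ [if x > p then x else p + 1]) l).sum - (S ++ [if x > p then x else p + 1]).sum) :=
      ih _ _ _ x hub' hfull' (fun z hz => (List.pairwise_cons.mp hpw).1 z hz)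
        (List.pairwise_cons.mp hpw).2
    simp only [List.foldl_cons]
    rw [step, pvPark_cons, hsettle, List.sum_append]
    simp
    omega

theorem pv_maxmarks_alt_eq_park (input1 : Int) (input2 : List Int) :
    maxmarks_alt input1 input2 = (pvPark [] (PySem.List.sorted input2 (fun x => x) false)).sum := by
  unfold maxmarks_alt
  cases hs : PySem.List.sorted input2 (fun x => x) false with
  | nil => simp [pvPark_nil]
  | cons x l =>
    have hpw : (x :: l).Pairwise (fun a b => a ≤ b) := by
      have := PySem.List.sorted_pairwise input2 (fun x => x) (κ := Int)
      rw [hs] at this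
      simpa using this
    have hx : pvSettle [] x = x := pvSettle_of_not_mem [] x (by simp)
    have step : (l.foldl (fun (st : Int × Option Int) x =>
        let y := match st.2 with
          | none => x
          | some p => if x > p then x else p + 1
        (st.1 + y, some y)) (0 + x, some x)).1 = (0 + x) + ((pvPark [x] l).sum - ([x] : List Int).sum) :=
      pv_sweep l [x] x (0 + x) x
        (by intro z hz; simp at hz; omega)
        (by intro u h1 h2; simp; omega)
        (fun z hz => (List.pairwise_cons.mp hpw).1 z hz)
        (List.pairwise_cons.mp hpw).2
    simp only [List.foldl_cons]
    rw [step, pvPark_cons, hx]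
    simp

-- ===== VERDICT (by name: the statement is the Claim_ definition above) =====
theorem maxmarks_spec : Claim_equal_maxmarks := by
  intro input1 input2 _
  unfold Spec_maxmarks
  rw [pv_maxmarks_eq_park, pv_maxmarks_alt_eq_park]
  set L := PySem.Set.ofList input2 ++ (PySem.Set.ofList input2).flatMap
    (fun k => if (input2.count k : Int) > 1 then List.replicate ((input2.count k : Int) - 1).toNat k else []) with hL
  have hperm : L.Perm (PySem.List.sorted input2 (fun x => x) false) :=
    (pv_keys_dups_perm input2).trans (PySem.List.sorted_perm input2 (fun x => x) false).symm
  exact pvE_sum (pvPark_perm hperm []) (pvPark_nodup L [] (by simp)) (pvPark_nodup _ [] (by simp))
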